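-- pv_equiv track=rewrite | github.com/caork/AtlasNER | src/atlas_ner/data/dataset.py | truncate_word_pieces
-- ===== SOURCE A (Python) =====
-- def truncate_word_pieces(
--     pieces: list[list[int]],
--     max_length: int,
--     use_jpt: bool,
-- ) -> int:
--     total = 0
--     kept = 0
--     for word_pieces in pieces:
--         next_total = total + len(word_pieces)
--         candidate_total = next_total * (2 if use_jpt else 1) + (1 if use_jpt else 0)
--         if candidate_total > max_length:
--             break
--         total = next_total
--         kept += 1
--     return max(kept, 1 if pieces else 0)
-- ===== SOURCE B (Python) =====
-- def truncate_word_pieces(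
--     pieces: list[list[int]],
--     max_length: int,
--     use_jpt: bool,
-- ) -> int:
--     mul, add = (2, 1) if use_jpt else (1, 0)
--     prefix = []
--     run = 0
--     for word_pieces in pieces:
--         run += len(word_pieces)
--         prefix.append(run)
--     kept = sum(1 for p in prefix if p * mul + add <= max_length)
--     return max(kept, 1 if pieces else 0)
-- ===== Notes on version B (the rewrite author's own statement) =====
-- stated objective: alternative
-- what changed: Replaces the early-exit accumulation loop with a prefix-sum table plus a single count of the prefixes whose scaled token total fits (correct because piece lengths are nonnegative, so the candidate totals are monotone).
import Mathlib
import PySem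

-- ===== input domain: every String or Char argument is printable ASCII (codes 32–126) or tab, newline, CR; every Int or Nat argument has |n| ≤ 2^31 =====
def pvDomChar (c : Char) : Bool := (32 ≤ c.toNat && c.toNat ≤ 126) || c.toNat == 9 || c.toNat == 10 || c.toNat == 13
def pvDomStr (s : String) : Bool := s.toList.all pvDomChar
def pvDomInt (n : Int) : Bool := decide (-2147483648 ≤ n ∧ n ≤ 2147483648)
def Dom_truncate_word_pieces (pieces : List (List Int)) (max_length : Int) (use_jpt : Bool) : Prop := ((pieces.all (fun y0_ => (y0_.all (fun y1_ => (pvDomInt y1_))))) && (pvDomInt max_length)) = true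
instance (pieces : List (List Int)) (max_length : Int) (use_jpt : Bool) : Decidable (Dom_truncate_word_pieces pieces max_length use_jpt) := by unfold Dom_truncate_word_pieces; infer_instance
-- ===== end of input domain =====

-- B replaces A's early-exit accumulation loop by a prefix-sum table plus one count of the
-- fitting prefixes (an alternative decomposition of the same O(n) task, not claimed faster).

-- ===== PORT A =====
-- the for-loop with break, as structural recursion over (total, kept)
def pvTruncLoop (use_jpt : Bool) (max_length : Int) : List (List Int) → Int → Int → Int
  | [], _, kept => kept
  | word_pieces :: rest, total, kept =>
    let next_total := total + (word_pieces.length : Int)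
    let candidate_total := next_total * (if use_jpt then 2 else 1) + (if use_jpt then 1 else 0)
    if candidate_total > max_length then kept
    else pvTruncLoop use_jpt max_length rest next_total (kept + 1)

def truncate_word_pieces (pieces : List (List Int)) (max_length : Int) (use_jpt : Bool) : Int :=
  max (pvTruncLoop use_jpt max_length pieces 0 0) (if pieces = [] then 0 else 1)

-- ===== PORT B =====
-- the prefix-building loop of Source B (run accumulates, each new run is appended)
def pvPrefixSums (run : Int) : List (List Int) → List Int
  | [] => []
  | word_pieces :: rest =>
    let r := run + (word_pieces.length : Int)
    r :: pvPrefixSums r rest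

def truncate_word_pieces_alt (pieces : List (List Int)) (max_length : Int) (use_jpt : Bool) : Int :=
  let mul : Int := if use_jpt then 2 else 1
  let add : Int := if use_jpt then 1 else 0
  let prefix_ := pvPrefixSums 0 pieces
  -- sum(1 for p in prefix if p * mul + add <= max_length)
  let kept : Int := (prefix_.countP (fun p => p * mul + add ≤ max_length) : Nat)
  max kept (if pieces = [] then 0 else 1)

-- ===== PRECONDITION & SPEC =====
def Spec_truncate_word_pieces (pieces : List (List Int)) (max_length : Int) (use_jpt : Bool) (out : Int) : Prop := out = truncate_word_pieces_alt pieces max_length use_jpt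
instance (pieces : List (List Int)) (max_length : Int) (use_jpt : Bool) (out : Int) : Decidable (Spec_truncate_word_pieces pieces max_length use_jpt out) := by unfold Spec_truncate_word_pieces; infer_instance

-- ===== CLAIM (what is proved, stated in full; the proofs are below) =====
def Claim_equal_truncate_word_pieces : Prop := ∀ (pieces : List (List Int)) (max_length : Int) (use_jpt : Bool), Dom_truncate_word_pieces pieces max_length use_jpt → Spec_truncate_word_pieces pieces max_length use_jpt (truncate_word_pieces pieces max_length use_jpt)

-- ===== LEMMAS AND PROOFS =====


-- every prefix sum is at least the running total it starts from
theorem pvPrefixSums_ge (l : List (List Int)) (t p : Int) (hp : p ∈ pvPrefixSums t l) : t ≤ p := by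
  induction l generalizing t with
  | nil => simp [pvPrefixSums] at hp
  | cons wp rest ih =>
    simp only [pvPrefixSums, List.mem_cons] at hp
    have hlen : (0:Int) ≤ (wp.length : Int) := Int.natCast_nonneg _
    rcases hp with h | h
    · omega
    · have := ih (t + (wp.length : Int)) h; omega

-- A's loop counts exactly the prefixes whose scaled total fits, because the candidate
-- totals are monotone (piece lengths are nonnegative)
theorem pvTruncLoop_eq_countP (u : Bool) (m : Int) (l : List (List Int)) (t kept : Int) :
    pvTruncLoop u m l t kept =
      kept + ((pvPrefixSums t l).countP
        (fun p => p * (if u then 2 else 1) + (if u then 1 else 0) ≤ m) : Nat) := by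
  induction l generalizing t kept with
  | nil => simp [pvTruncLoop, pvPrefixSums]
  | cons wp rest ih =>
    simp only [pvTruncLoop, pvPrefixSums]
    set r := t + (wp.length : Int) with hr
    by_cases hc : r * (if u then 2 else 1) + (if u then 1 else 0) > m
    · rw [if_pos hc]
      have hz : (pvPrefixSums t (wp :: rest)).countP
          (fun p => p * (if u then 2 else 1) + (if u then 1 else 0) ≤ m) = 0 := by
        rw [List.countP_eq_zero]
        intro p hp
        have hge : r ≤ p := by
          simp only [pvPrefixSums, List.mem_cons] at hp
          rcases hp with h | h
          · omega
          · exact pvPrefixSums_ge rest r p h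
        simp only [decide_eq_true_eq]
        intro hle
        have hmul : r * (if u = true then (2:Int) else 1) ≤ p * (if u = true then (2:Int) else 1) :=
          mul_le_mul_of_nonneg_right hge (by split <;> omega)
        linarith
      simp only [pvPrefixSums] at hz
      rw [hz]; simp
    · rw [if_neg hc]
      rw [ih r (kept + 1)]
      rw [not_lt] at hc
      rw [List.countP_cons]
      simp only [decide_eq_true_eq, hc, if_pos]
      push_cast; ring

-- ===== VERDICT (by name: the statement is the Claim_ definition above) =====
theorem truncate_word_pieces_spec : Claim_equal_truncate_word_pieces := by
  intro pieces max_length use_jpt _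
  unfold Spec_truncate_word_pieces truncate_word_pieces truncate_word_pieces_alt
  rw [pvTruncLoop_eq_countP]
  simp
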